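-- pv_equiv track=rewrite | github.com/warren-wupeng/build-my-own-coding-agent | v4/delegation/manager.py | _extract_result_from_messages
-- ===== SOURCE A (Python) =====
-- from typing import Dict, Any, Optional, List
--
-- def _extract_result_from_messages(messages: List[Dict[str, Any]]) -> str:
--     """
--     Extract the final result from sub-agent conversation messages.
--
--     Args:
--         messages: List of conversation messages from sub-agent
--
--     Returns:
--         String representation of the sub-agent's result
--     """
--     if not messages:
--         return "No output generated"
--
--     # Look for the last assistant message
--     for message in reversed(messages):
--         if message.get('role') == 'assistant' and message.get('content'):
--             return message['content']
--
--     # If no assistant message found, look for tool outputs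
--     tool_results = []
--     for message in messages:
--         if message.get('role') == 'tool' and message.get('content'):
--             tool_results.append(f"{message.get('name', 'tool')}: {message['content']}")
--
--     if tool_results:
--         return "Tool outputs:\n" + "\n".join(tool_results)
--
--     return "No meaningful output found"
-- ===== SOURCE B (Python) =====
-- from typing import Dict, Any, List
--
-- def _extract_result_from_messages(messages: List[Dict[str, Any]]) -> str:
--     if not messages:
--         return "No output generated"
--
--     # Single forward pass: remember the most recent truthy assistant content,
--     # collect tool outputs as we go.
--     last_assistant = None
--     tool_results = []
--     for message in messages:
--         role = message.get('role')
--         content = message.get('content')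
--         if role == 'assistant' and content:
--             last_assistant = content
--         elif role == 'tool' and content:
--             tool_results.append(f"{message.get('name', 'tool')}: {content}")
--
--     if last_assistant is not None:
--         return last_assistant
--     if tool_results:
--         return "Tool outputs:\n" + "\n".join(tool_results)
--     return "No meaningful output found"
-- ===== Notes on version B (the rewrite author's own statement) =====
-- stated objective: simpler
-- what changed: Replaces the reversed early-return scan plus a conditional second forward scan with one forward pass that maintains two accumulators (last truthy assistant content, and the tool-output list).
import Mathlib
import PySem

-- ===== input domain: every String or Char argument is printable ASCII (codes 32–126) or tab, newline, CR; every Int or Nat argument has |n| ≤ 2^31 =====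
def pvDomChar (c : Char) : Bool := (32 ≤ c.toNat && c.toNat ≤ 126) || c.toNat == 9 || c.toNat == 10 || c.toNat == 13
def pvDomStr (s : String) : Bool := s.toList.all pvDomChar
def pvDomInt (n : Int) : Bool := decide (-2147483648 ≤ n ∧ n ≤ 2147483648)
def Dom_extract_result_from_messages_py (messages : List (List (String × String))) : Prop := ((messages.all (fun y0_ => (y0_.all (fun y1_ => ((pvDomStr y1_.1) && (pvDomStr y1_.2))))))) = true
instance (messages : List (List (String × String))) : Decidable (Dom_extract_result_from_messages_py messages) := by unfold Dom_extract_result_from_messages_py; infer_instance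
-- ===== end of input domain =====

-- B replaces A's reversed early-return scan plus conditional second forward scan by one
-- forward pass holding two accumulators; same return value, objective: simpler.

-- message.get(k): first-match lookup in the association list, none if absent
def pvGet (m : List (String × String)) (k : String) : Option String :=
  (m.find? (fun p => p.1 == k)).map (·.2)

-- Python truthiness of message.get('content') (a string or missing)
def pvTruthy : Option String → Bool
  | some s => s ≠ ""
  | none => false

-- ===== PORT A =====
-- for message in reversed(messages): if role == 'assistant' and content: return content
def pyA_scan : List (List (String × String)) → Option String
  | [] => none
  | m :: rest =>
    if pvGet m "role" = some "assistant" ∧ pvTruthy (pvGet m "content") then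
      pvGet m "content"
    else pyA_scan rest

-- second loop: collect "name: content" for truthy tool messages
def pyA_tools : List (List (String × String)) → List String
  | [] => []
  | m :: rest =>
    if pvGet m "role" = some "tool" ∧ pvTruthy (pvGet m "content") then
      ((pvGet m "name").getD "tool" ++ ": " ++ (pvGet m "content").getD "") :: pyA_tools rest
    else pyA_tools rest

def extract_result_from_messages_py (messages : List (List (String × String))) : String :=
  if messages = [] then "No output generated"
  else
    match pyA_scan messages.reverse with
    | some c => c
    | none =>
      let tool_results := pyA_tools messages
      if tool_results ≠ [] then "Tool outputs:\n" ++ PySem.Str.join "\n" tool_results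
      else "No meaningful output found"

-- ===== PORT B =====
-- one forward pass: (last_assistant, tool_results) accumulator
def pyB_step (acc : Option String × List String) (m : List (String × String)) :
    Option String × List String :=
  let role := pvGet m "role"
  let content := pvGet m "content"
  if role = some "assistant" ∧ pvTruthy content then
    (content, acc.2)
  else if role = some "tool" ∧ pvTruthy content then
    (acc.1, acc.2 ++ [(pvGet m "name").getD "tool" ++ ": " ++ content.getD ""])
  else acc

def extract_result_from_messages_py_alt (messages : List (List (String × String))) : String :=
  if messages = [] then "No output generated"
  else
    let st := messages.foldl pyB_step (none, [])
    match st.1 with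
    | some s => s
    | none =>
      if st.2 ≠ [] then "Tool outputs:\n" ++ PySem.Str.join "\n" st.2
      else "No meaningful output found"

-- ===== PRECONDITION & SPEC =====
def Spec_extract_result_from_messages_py (messages : List (List (String × String))) (out : String) : Prop := out = extract_result_from_messages_py_alt messages
instance (messages : List (List (String × String))) (out : String) : Decidable (Spec_extract_result_from_messages_py messages out) := by unfold Spec_extract_result_from_messages_py; infer_instance

-- ===== CLAIM (what is proved, stated in full; the proofs are below) =====
def Claim_equal_extract_result_from_messages_py : Prop := ∀ (messages : List (List (String × String))), Dom_extract_result_from_messages_py messages → Spec_extract_result_from_messages_py messages (extract_result_from_messages_py messages)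

-- ===== LEMMAS AND PROOFS =====

theorem pyA_scan_append (xs ys : List (List (String × String))) :
    pyA_scan (xs ++ ys) = (pyA_scan xs).orElse (fun _ => pyA_scan ys) := by
  induction xs with
  | nil => simp [pyA_scan]
  | cons m rest ih =>
    simp only [List.cons_append, pyA_scan]
    split_ifs with h
    · cases hc : pvGet m "content" with
      | none => simp [hc, pvTruthy] at h
      | some c =>
        have : c ≠ "" := by simpa [pvTruthy, hc] using h.2
        simp [Option.orElse]
    · exact ih

-- head-message effect of one fold step, phrased through A's two loops
theorem pyB_step_fst (acc : Option String × List String) (m : List (String × String)) :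
    (pyB_step acc m).1 = (pyA_scan [m]).orElse (fun _ => acc.1) := by
  by_cases h1 : pvGet m "role" = some "assistant" ∧ pvTruthy (pvGet m "content") = true
  · cases hc : pvGet m "content" with
    | none => rw [hc] at h1; simp [pvTruthy] at h1
    | some c =>
        have ht : pvTruthy (some c) = true := hc ▸ h1.2
        simp [pyB_step, pyA_scan, h1, hc, ht, Option.orElse]
  · by_cases h2 : pvGet m "role" = some "tool" ∧ pvTruthy (pvGet m "content") = true <;>
      simp [pyB_step, pyA_scan, h1, h2, Option.orElse]

theorem pyB_step_snd (acc : Option String × List String) (m : List (String × String)) :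
    (pyB_step acc m).2 = acc.2 ++ pyA_tools [m] := by
  by_cases h1 : pvGet m "role" = some "assistant" ∧ pvTruthy (pvGet m "content") = true
  · simp [pyB_step, pyA_tools, h1]
  · by_cases h2 : pvGet m "role" = some "tool" ∧ pvTruthy (pvGet m "content") = true <;>
      simp [pyB_step, pyA_tools, h1, h2]

theorem pyA_tools_cons (m : List (String × String)) (rest : List (List (String × String))) :
    pyA_tools (m :: rest) = pyA_tools [m] ++ pyA_tools rest := by
  by_cases h : pvGet m "role" = some "tool" ∧ pvTruthy (pvGet m "content") = true <;>
    simp [pyA_tools, h]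

-- the fold's state, under induction on the list from the left
theorem pyB_foldl_spec (msgs : List (List (String × String))) (acc : Option String × List String) :
    msgs.foldl pyB_step acc =
      ((pyA_scan msgs.reverse).orElse (fun _ => acc.1), acc.2 ++ pyA_tools msgs) := by
  induction msgs generalizing acc with
  | nil => simp [pyA_scan, pyA_tools]
  | cons m rest ih =>
    rw [List.foldl_cons, ih, List.reverse_cons, pyA_scan_append, pyA_tools_cons,
        pyB_step_fst, pyB_step_snd]
    refine Prod.ext ?_ (by simp)
    cases pyA_scan rest.reverse <;> simp [Option.orElse]

-- ===== VERDICT (by name: the statement is the Claim_ definition above) =====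
theorem extract_result_from_messages_py_spec : Claim_equal_extract_result_from_messages_py := by
  intro messages _
  unfold Spec_extract_result_from_messages_py extract_result_from_messages_py extract_result_from_messages_py_alt
  by_cases h : messages = []
  · simp [h]
  · simp only [h]
    rw [pyB_foldl_spec]
    cases hs : pyA_scan messages.reverse with
    | some c => simp [Option.orElse]
    | none => simp [Option.orElse]
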